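-- pv_equiv track=rewrite | github.com/GoreNetwork/Get-non-802.1x-ports | Find-ports.py | no_extra_spaces
-- ===== SOURCE A (Python) =====
-- def no_extra_spaces(line):
--
-- 	lst = ""
-- 	for each_letter in line:
-- 		if each_letter != " ":
-- 			lst=lst+each_letter
-- 		if each_letter == " ":
-- 			lst=lst+"#"
-- 	for pound in lst:
-- 		lst = lst.replace("##", "#")
-- 	return lst
-- ===== SOURCE B (Python) =====
-- def no_extra_spaces(line):
--     # one pass: map ' '->'#', skip a '#' when the last emitted char is already '#'
--     out = []
--     for ch in line:
--         c = '#' if ch == ' ' else ch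
--         if c == '#' and out and out[-1] == '#':
--             continue
--         out.append(c)
--     return ''.join(out)
-- ===== Notes on version B (the rewrite author's own statement) =====
-- stated objective: faster
-- what changed: A builds the space-replaced string char by char and then runs len(s) full string.replace('##','#') passes; B does a single pass that maps ' ' to '#' and skips a '#' whenever the last emitted character is already '#'.
import Mathlib
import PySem

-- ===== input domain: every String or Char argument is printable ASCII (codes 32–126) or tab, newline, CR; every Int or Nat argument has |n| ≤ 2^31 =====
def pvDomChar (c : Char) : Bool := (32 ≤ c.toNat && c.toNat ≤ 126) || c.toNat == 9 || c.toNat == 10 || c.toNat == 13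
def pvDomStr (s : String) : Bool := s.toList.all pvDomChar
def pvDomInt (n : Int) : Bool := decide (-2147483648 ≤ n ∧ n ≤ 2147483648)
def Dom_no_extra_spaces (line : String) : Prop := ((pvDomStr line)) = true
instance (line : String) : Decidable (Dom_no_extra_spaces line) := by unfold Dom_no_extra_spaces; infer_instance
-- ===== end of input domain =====

-- B replaces A's char-by-char build plus len(s) full replace('##','#') passes by a single
-- last-emitted-char pass (objective: faster, O(n) instead of O(n^2)).


-- ===== PORT A =====
-- first loop: build lst; second loop: for each char of (the original) lst, lst = lst.replace("##","#")
def no_extra_spaces (line : String) : String :=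
  let lst : List Char := line.toList.foldl (fun lst c =>
      let lst := if c ≠ ' ' then lst ++ [c] else lst
      if c = ' ' then lst ++ ['#'] else lst) []
  let lst := lst.foldl (fun cur _ => PySem.Chars.replace cur "##".toList "#".toList) lst
  String.mk lst

-- ===== PORT B =====
-- one pass: map ' '->'#', skip a '#' when the last emitted char is already '#'
def no_extra_spaces_alt (line : String) : String :=
  String.mk (line.toList.foldl (fun out ch =>
      let c := if ch = ' ' then '#' else ch
      if c = '#' ∧ out.getLast? = some '#' then out else out ++ [c]) [])

-- ===== PRECONDITION & SPEC =====
def Spec_no_extra_spaces (line : String) (out : String) : Prop := out = no_extra_spaces_alt line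
instance (line : String) (out : String) : Decidable (Spec_no_extra_spaces line out) := by unfold Spec_no_extra_spaces; infer_instance

-- ===== CLAIM (what is proved, stated in full; the proofs are below) =====
def Claim_equal_no_extra_spaces : Prop := ∀ (line : String), Dom_no_extra_spaces line → Spec_no_extra_spaces line (no_extra_spaces line)

-- ===== LEMMAS AND PROOFS =====

-- ' ' → '#', everything else unchanged
def pvSub (c : Char) : Char := if c = ' ' then '#' else c

-- one pass of str.replace("##", "#"), as structural recursion
def pvRepl : List Char → List Char
  | [] => []
  | [c] => [c]
  | a :: b :: rest => if a = '#' ∧ b = '#' then '#' :: pvRepl rest else a :: pvRepl (b :: rest)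

-- collapse runs of '#' to one; the flag says whether the previously emitted char was '#'
def pvCl : Bool → List Char → List Char
  | _, [] => []
  | p, c :: cs => if c = '#' then (if p then pvCl true cs else '#' :: pvCl true cs) else c :: pvCl false cs

theorem pvRepl_length_le (s : List Char) : (pvRepl s).length ≤ s.length := by
  induction s using pvRepl.induct with
  | case1 => simp [pvRepl]
  | case2 c => simp [pvRepl]
  | case3 a b rest h ih => simp only [pvRepl, if_pos h, List.length_cons]; omega
  | case4 a b rest h ih => simp only [pvRepl, if_neg h, List.length_cons]; simpa using ih

theorem pvRepl_length_lt (s : List Char) (h : pvRepl s ≠ s) : (pvRepl s).length < s.length := by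
  induction s using pvRepl.induct with
  | case1 => simp [pvRepl] at h
  | case2 c => simp [pvRepl] at h
  | case3 a b rest hab ih =>
      have := pvRepl_length_le rest
      simp only [pvRepl, if_pos hab, List.length_cons]; omega
  | case4 a b rest hab ih =>
      simp only [pvRepl, if_neg hab, List.length_cons]
      have h2 : pvRepl (b :: rest) ≠ b :: rest := by
        intro he; apply h; simp [pvRepl, if_neg hab, he]
      have h3 := ih h2
      simp only [List.length_cons] at h3 ⊢
      omega

theorem pvCl_eq_of_head_ne (p : Bool) (b : Char) (rest : List Char) (hb : b ≠ '#') :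
    pvCl p (b :: rest) = b :: pvCl false rest := by
  simp [pvCl, hb]

-- one replace pass does not change the collapsed form
theorem pvCl_repl (s : List Char) : ∀ p, pvCl p (pvRepl s) = pvCl p s := by
  induction s using pvRepl.induct with
  | case1 => intro p; rfl
  | case2 c => intro p; rfl
  | case3 a b rest hab ih =>
      intro p
      obtain ⟨ha, hb⟩ := hab
      subst ha hb
      simp [pvRepl, pvCl, ih]
  | case4 a b rest hab ih =>
      intro p
      simp only [pvRepl, if_neg hab]
      by_cases ha : a = '#'
      · subst ha
        simp [pvCl, ih]
      · simp [pvCl, ha, ih]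

-- a fixed point of the replace pass is already collapsed
theorem pvCl_of_fixed (s : List Char) (h : pvRepl s = s) : pvCl false s = s := by
  induction s using pvRepl.induct with
  | case1 => rfl
  | case2 c => by_cases hc : c = '#' <;> simp [pvCl, hc]
  | case3 a b rest hab ih =>
      exfalso
      obtain ⟨ha, hb⟩ := hab; subst ha hb
      simp [pvRepl] at h
      have hle := pvRepl_length_le rest
      have hlen := congrArg List.length h
      simp only [List.length_cons] at hlen
      omega
  | case4 a b rest hab ih =>
      simp only [pvRepl, if_neg hab] at h
      have h' : pvRepl (b :: rest) = b :: rest := by injection h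
      have ihv := ih h'
      by_cases ha : a = '#'
      · subst ha
        have hb : b ≠ '#' := fun hb => hab ⟨rfl, hb⟩
        rw [pvCl_eq_of_head_ne false b rest hb] at ihv
        have hr : pvCl false rest = rest := by simpa using ihv
        simp [pvCl, hb, hr]
      · by_cases hb : b = '#'
        · subst hb
          have ht : pvCl true rest = rest := by simpa [pvCl] using ihv
          simp [pvCl, ha, ht]
        · rw [pvCl_eq_of_head_ne false b rest hb] at ihv
          have hr : pvCl false rest = rest := by simpa using ihv
          simp [pvCl, ha, hb, hr]

-- enough iterations of the replace pass reach the collapsed form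
theorem pvIter_repl (n : ℕ) : ∀ s : List Char, s.length ≤ n → pvRepl^[n] s = pvCl false s := by
  induction n with
  | zero =>
      intro s hs
      have : s = [] := List.eq_nil_of_length_eq_zero (Nat.le_zero.mp hs)
      subst this; rfl
  | succ n ih =>
      intro s hs
      rw [Function.iterate_succ_apply]
      by_cases hfix : pvRepl s = s
      · rw [hfix, Function.iterate_fixed hfix, pvCl_of_fixed s hfix]
      · have hlt := pvRepl_length_lt s hfix
        rw [ih (pvRepl s) (by omega), pvCl_repl]

-- A's first loop is map pvSub
theorem pvLoop1_eq (line : List Char) :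
    line.foldl (fun lst c =>
      let lst := if c ≠ ' ' then lst ++ [c] else lst
      if c = ' ' then lst ++ ['#'] else lst) [] = line.map pvSub := by
  have hf : (fun (lst : List Char) (c : Char) =>
      let lst := if c ≠ ' ' then lst ++ [c] else lst
      if c = ' ' then lst ++ ['#'] else lst) = fun lst c => lst ++ [pvSub c] := by
    funext lst c
    by_cases hc : c = ' ' <;> simp [pvSub, hc]
  rw [hf, PySem.List.foldl_append_singleton_eq_map]
  simp

-- one call of Chars.replace "##" "#" is pvRepl
theorem pvReplace_go_eq (fuel : ℕ) : ∀ (l acc : List Char), l.length ≤ fuel →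
    PySem.Chars.replace.go ['#','#'] ['#'] fuel l acc = acc.reverse ++ pvRepl l := by
  induction fuel with
  | zero =>
      intro l acc hl
      have : l = [] := List.eq_nil_of_length_eq_zero (Nat.le_zero.mp hl)
      subst this
      simp [PySem.Chars.replace.go, pvRepl]
  | succ fuel ih =>
      intro l acc hl
      match l with
      | [] => simp [PySem.Chars.replace.go, pvRepl]
      | c :: t =>
        match t with
        | [] =>
          have hpre : (['#','#'] : List Char).isPrefixOf [c] = false := by
            simp [List.isPrefixOf]
          simp only [PySem.Chars.replace.go, hpre, Bool.false_eq_true, if_false]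
          rw [ih [] (c :: acc) (by simp)]
          simp [pvRepl]
        | d :: t' =>
          by_cases hcd : c = '#' ∧ d = '#'
          · obtain ⟨hc, hd⟩ := hcd; subst hc hd
            have hpre : (['#','#'] : List Char).isPrefixOf ('#' :: '#' :: t') = true := by
              simp [List.isPrefixOf]
            simp only [PySem.Chars.replace.go, hpre, if_true]
            rw [show List.drop (['#','#'] : List Char).length ('#' :: '#' :: t') = t' by simp]
            rw [ih t' (['#'].reverse ++ acc) (by simp at hl ⊢; omega)]
            simp [pvRepl]
          · have hpre : (['#','#'] : List Char).isPrefixOf (c :: d :: t') = false := by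
              simp [List.isPrefixOf]
              intro h1 h2
              exact hcd ⟨Eq.symm h1, Eq.symm h2⟩
            simp only [PySem.Chars.replace.go, hpre, Bool.false_eq_true, if_false]
            rw [ih (d :: t') (c :: acc) (by simp at hl ⊢; omega)]
            simp [pvRepl, if_neg hcd]

theorem pvReplace_eq (s : List Char) :
    PySem.Chars.replace s "##".toList "#".toList = pvRepl s := by
  show PySem.Chars.replace s ['#','#'] ['#'] = pvRepl s
  rw [PySem.Chars.replace]
  simp only [List.isEmpty_cons, Bool.false_eq_true, if_false]
  simpa using pvReplace_go_eq s.length s [] le_rfl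

-- B's loop computes pvCl of the mapped list
theorem pvLoopB_eq (l : List Char) : ∀ acc : List Char,
    l.foldl (fun out ch =>
      let c := if ch = ' ' then '#' else ch
      if c = '#' ∧ out.getLast? = some '#' then out else out ++ [c]) acc
    = acc ++ pvCl (decide (acc.getLast? = some '#')) (l.map pvSub) := by
  induction l with
  | nil => intro acc; simp [pvCl]
  | cons ch l ih =>
      intro acc
      simp only [List.foldl_cons, List.map_cons]
      by_cases hskip : pvSub ch = '#' ∧ acc.getLast? = some '#'
      · obtain ⟨hc, hlast⟩ := hskip
        rw [show (if ch = ' ' then '#' else ch) = pvSub ch from rfl, hc]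
        simp only [hlast, and_self, if_pos, ih acc]
        simp [pvCl]
      · rw [show (if ch = ' ' then '#' else ch) = pvSub ch from rfl]
        rw [if_neg (by rw [show (pvSub ch = '#' ∧ acc.getLast? = some '#') ↔
              (pvSub ch = '#' ∧ acc.getLast? = some '#') from Iff.rfl]; exact hskip)]
        rw [ih (acc ++ [pvSub ch])]
        rw [List.append_assoc]
        congr 1
        have hlast' : (acc ++ [pvSub ch]).getLast? = some (pvSub ch) := by simp
        by_cases hc : pvSub ch = '#'
        · have hp : acc.getLast? ≠ some '#' := fun h => hskip ⟨hc, h⟩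
          rw [hc] at hlast' ⊢
          simp [pvCl, hlast', hp]
        · rw [hlast']
          simp [pvCl, hc]

-- ===== VERDICT (by name: the statement is the Claim_ definition above) =====
theorem no_extra_spaces_spec : Claim_equal_no_extra_spaces := by
  intro line _
  show no_extra_spaces line = no_extra_spaces_alt line
  unfold no_extra_spaces no_extra_spaces_alt
  rw [pvLoop1_eq, pvLoopB_eq]
  simp only [List.nil_append, List.getLast?_nil]
  have hfun : (fun (cur : List Char) (_ : Char) => PySem.Chars.replace cur "##".toList "#".toList)
      = fun cur _ => pvRepl cur := by
    funext cur _; exact pvReplace_eq cur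
  rw [hfun, List.foldl_const]
  rw [pvIter_repl _ _ (by simp)]
  simp
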